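-- pv_equiv track=rewrite | github.com/mrsxman/asadbeshakx_ku | zadacha7.py | eng_kichik_ketma_ketlik
-- ===== SOURCE A (Python) =====
-- def eng_kichik_ketma_ketlik(n):
--     num_str = str(n)
--     max_count = 0
--     current_count = 0
--     last_digit = None
--
--     for digit in num_str:
--         if digit in ['0', '1']:
--             if last_digit is None or digit == last_digit:
--                 current_count += 1
--             else:
--                 current_count = 1
--         else:
--             current_count = 0
--
--         max_count = max(max_count, current_count)
--         last_digit = digit
--
--     return max_count
-- ===== SOURCE B (Python) =====
-- def eng_kichik_ketma_ketlik(n):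
--     s = str(n)
--     best = 0
--     i = 0
--     while i < len(s):
--         c = s[i]
--         if c in '01':
--             j = i + 1
--             while j < len(s) and s[j] == c:
--                 j += 1
--             if j - i > best:
--                 best = j - i
--             i = j
--         else:
--             i += 1
--     return best
-- ===== Notes on version B (the rewrite author's own statement) =====
-- stated objective: alternative
-- what changed: Replaces A's per-character fold with running counter/last-digit state by a two-pointer scan that jumps over each maximal run of an identical binary digit and takes the max of run lengths.
import Mathlib
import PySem

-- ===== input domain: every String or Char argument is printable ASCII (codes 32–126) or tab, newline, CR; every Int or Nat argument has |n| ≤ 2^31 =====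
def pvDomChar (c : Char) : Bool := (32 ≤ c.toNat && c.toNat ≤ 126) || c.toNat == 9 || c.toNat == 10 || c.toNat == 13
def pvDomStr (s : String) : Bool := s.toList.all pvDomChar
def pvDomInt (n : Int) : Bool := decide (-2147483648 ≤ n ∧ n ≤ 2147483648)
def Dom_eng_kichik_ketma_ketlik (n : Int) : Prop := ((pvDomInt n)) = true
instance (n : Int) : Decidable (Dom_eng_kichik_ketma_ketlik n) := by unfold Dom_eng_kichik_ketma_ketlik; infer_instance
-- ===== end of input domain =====

-- B replaces A's per-character counter/last-digit fold by a two-pointer scan that jumps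
-- over each maximal run of an identical binary digit (alternative decomposition, same cost).

-- ===== PORT A =====
-- state = (max_count, current_count, last_digit); one step of A's for-loop body
def pvStepA (st : Int × Int × Option Char) (digit : Char) : Int × Int × Option Char :=
  let cur :=
    if digit = '0' ∨ digit = '1' then
      if st.2.2 = none ∨ st.2.2 = some digit then st.2.1 + 1 else 1
    else 0
  (max st.1 cur, cur, some digit)

def eng_kichik_ketma_ketlik (n : Int) : Int :=
  ((PySem.Int.toStr n).toList.foldl pvStepA (0, 0, none)).1

-- ===== PORT B =====
-- two-pointer scan: on a binary digit, measure the whole maximal run and jump past it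
def pvScanB : List Char → Int → Int
  | [], best => best
  | c :: rest, best =>
    if c = '0' ∨ c = '1' then
      pvScanB (rest.dropWhile (· == c)) (max best (1 + ((rest.takeWhile (· == c)).length : Int)))
    else
      pvScanB rest best
termination_by l _ => l.length
decreasing_by
· exact Nat.lt_succ_of_le (List.length_dropWhile_le _ _)
· exact Nat.lt_succ_self _

def eng_kichik_ketma_ketlik_alt (n : Int) : Int :=
  pvScanB (PySem.Int.toStr n).toList 0

-- ===== PRECONDITION & SPEC =====
def Spec_eng_kichik_ketma_ketlik (n : Int) (out : Int) : Prop := out = eng_kichik_ketma_ketlik_alt n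
instance (n : Int) (out : Int) : Decidable (Spec_eng_kichik_ketma_ketlik n out) := by unfold Spec_eng_kichik_ketma_ketlik; infer_instance

-- ===== CLAIM (what is proved, stated in full; the proofs are below) =====
def Claim_equal_eng_kichik_ketma_ketlik : Prop := ∀ (n : Int), Dom_eng_kichik_ketma_ketlik n → Spec_eng_kichik_ketma_ketlik n (eng_kichik_ketma_ketlik n)

-- ===== LEMMAS AND PROOFS =====

theorem pv_head_dropWhile_false (p : Char → Bool) (l : List Char) (a : Char)
    (h : (l.dropWhile p).head? = some a) : p a = false := by
  induction l with
  | nil => simp [List.dropWhile] at h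
  | cons x xs ih =>
    rw [List.dropWhile_cons] at h
    by_cases hp : p x
    · simp [hp] at h; exact ih h
    · simp [hp] at h; rw [← h]; simpa using hp

-- A consumes a run of m copies of the binary digit it is currently counting
theorem pv_runA (m : Nat) (rest : List Char) (mx k : Int) (c : Char)
    (hc : c = '0' ∨ c = '1') (hk : k ≤ mx) :
    List.foldl pvStepA (mx, k, some c) (List.replicate m c ++ rest)
      = List.foldl pvStepA (max mx (k + (m : Int)), k + (m : Int), some c) rest := by
  induction m generalizing mx k with
  | zero => simp [max_eq_left hk]
  | succ m ih =>
    rw [List.replicate_succ, List.cons_append, List.foldl_cons]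
    have hstep : pvStepA (mx, k, some c) c = (max mx (k + 1), k + 1, some c) := by
      simp [pvStepA, hc]
    rw [hstep, ih (max mx (k + 1)) (k + 1) (le_max_right _ _)]
    have e1 : k + 1 + (m : Int) = k + ((m + 1 : Nat) : Int) := by push_cast; ring
    have e2 : max (max mx (k + 1)) (k + 1 + (m : Int)) = max mx (k + ((m + 1 : Nat) : Int)) := by
      rw [max_assoc, max_eq_right (show (k + 1 : Int) ≤ k + 1 + (m : Int) by omega), e1]
    rw [e1] at e2
    rw [e1, e2]

-- the main invariant: at any "run boundary" A's fold agrees with B's scan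
theorem pv_main (l : List Char) (mx cur : Int) (last : Option Char)
    (hmx : 0 ≤ mx) (h0 : last = none → cur = 0)
    (hb : ∀ c, last = some c → (c = '0' ∨ c = '1') → l.head? ≠ some c) :
    (List.foldl pvStepA (mx, cur, last) l).1 = pvScanB l mx := by
  match l with
  | [] => simp [pvScanB]
  | c :: rest =>
    by_cases hc : c = '0' ∨ c = '1'
    · -- first step of the run sets current_count to 1
      have hstep : pvStepA (mx, cur, last) c = (max mx 1, 1, some c) := by
        cases last with
        | none => simp [pvStepA, hc, h0 rfl]
        | some d =>
          have hdc : ¬ (d = c) := by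
            intro h; subst h
            exact hb d rfl hc rfl
          simp [pvStepA, hc, hdc]
      rw [List.foldl_cons, hstep]
      have hrep : rest.takeWhile (· == c) = List.replicate (rest.takeWhile (· == c)).length c := by
        apply List.eq_replicate_of_mem
        intro a ha
        have := List.mem_takeWhile_imp ha
        simpa using this
      have hL : List.foldl pvStepA (max mx 1, 1, some c) rest
          = List.foldl pvStepA (max mx 1, 1, some c)
              (List.replicate (rest.takeWhile (· == c)).length c ++ rest.dropWhile (· == c)) := by
        conv_lhs => rw [← List.takeWhile_append_dropWhile (p := (· == c)) (l := rest)]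
        rw [← hrep]
      rw [hL, pv_runA _ _ _ _ _ hc (le_max_right _ _)]
      have hmerge : max (max mx 1) (1 + ((rest.takeWhile (· == c)).length : Int))
          = max mx (1 + ((rest.takeWhile (· == c)).length : Int)) := by
        rw [max_assoc, max_eq_right (show (1 : Int) ≤ 1 + ((rest.takeWhile (· == c)).length : Int) by omega)]
      have hrec := pv_main (rest.dropWhile (· == c))
          (max mx (1 + ((rest.takeWhile (· == c)).length : Int)))
          (1 + ((rest.takeWhile (· == c)).length : Int)) (some c)
          (le_trans hmx (le_max_left _ _)) (by simp)
          (by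
            intro d hd _
            cases hd
            intro hh
            have := pv_head_dropWhile_false (· == c) rest c hh
            simp at this)
      calc (List.foldl pvStepA
              (max (max mx 1) (1 + ((rest.takeWhile (· == c)).length : Int)),
               1 + ((rest.takeWhile (· == c)).length : Int), some c) (rest.dropWhile (· == c))).1
          = pvScanB (rest.dropWhile (· == c)) (max mx (1 + ((rest.takeWhile (· == c)).length : Int))) := by
            rw [hmerge]; exact hrec
        _ = pvScanB (c :: rest) mx := by rw [pvScanB]; simp [hc]
    · -- non-binary character: current_count resets to 0, max is unchanged
      have hstep : pvStepA (mx, cur, last) c = (max mx 0, 0, some c) := by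
        simp [pvStepA, hc]
      rw [List.foldl_cons, hstep]
      have hmx0 : max mx 0 = mx := max_eq_left hmx
      rw [hmx0]
      have hrec := pv_main rest mx 0 (some c) hmx (by simp)
        (by intro d hd hbin; cases hd; exact absurd hbin hc)
      rw [hrec, pvScanB]
      simp [hc]
termination_by l.length
decreasing_by
· exact Nat.lt_succ_of_le (List.length_dropWhile_le _ _)
· exact Nat.lt_succ_self _

-- ===== VERDICT (by name: the statement is the Claim_ definition above) =====
theorem eng_kichik_ketma_ketlik_spec : Claim_equal_eng_kichik_ketma_ketlik := by
  intro n _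
  unfold Spec_eng_kichik_ketma_ketlik eng_kichik_ketma_ketlik eng_kichik_ketma_ketlik_alt
  exact pv_main _ 0 0 none le_rfl (fun _ => rfl) (by intro c hc; cases hc)
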